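-- pv_equiv track=rewrite | github.com/Hyojeong721/TIL | algorithm/SWA/date/0820/gudtjs0428/5356_의석이의세로로말해요/s1.py | read_vertically
-- ===== SOURCE A (Python) =====
-- def read_vertically(strings):
--     max_length = 0
--     for string in strings:
--         if len(string) > max_length:
--             max_length = len(string)
--
--     new_string = ''
--     for i in range(max_length):
--         for j in range(5):
--             try:
--                 new_string += strings[j][i]
--             except:
--                 pass
--
--     return new_string
-- ===== SOURCE B (Python) =====
-- def read_vertically(strings):
--     rows = strings[:5]
--     parts = []
--     while any(rows):
--         parts.append(''.join(s[0] for s in rows if s))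
--         rows = [s[1:] for s in rows]
--     return ''.join(parts)
-- ===== Notes on version B (the rewrite author's own statement) =====
-- stated objective: idiomatic
-- what changed: Replaces the max-length scan plus index loops with try/except by a column-at-a-time transpose: repeatedly emit the first characters of the (at most five) remaining strings and step to their tails until all are exhausted.
import Mathlib
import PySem

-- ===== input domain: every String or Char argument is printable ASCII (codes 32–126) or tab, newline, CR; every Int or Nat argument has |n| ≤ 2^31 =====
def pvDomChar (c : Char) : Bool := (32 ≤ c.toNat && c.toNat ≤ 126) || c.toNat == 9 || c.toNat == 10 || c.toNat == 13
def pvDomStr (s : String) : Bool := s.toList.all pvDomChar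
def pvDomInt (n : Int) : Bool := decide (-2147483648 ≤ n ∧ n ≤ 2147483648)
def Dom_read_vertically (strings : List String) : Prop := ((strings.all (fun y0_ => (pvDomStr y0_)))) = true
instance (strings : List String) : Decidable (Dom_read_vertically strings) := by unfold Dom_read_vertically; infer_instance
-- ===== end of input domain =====

-- B replaces A's max-length scan and index loops with try/except by a tails-stepping transpose (idiomatic, same cost).

-- ===== PORT A =====
def read_vertically (strings : List String) : String :=
  let maxLength : Int :=
    strings.foldl (fun m s => if PySem.Str.len s > m then PySem.Str.len s else m) 0
  let newString : List Char :=
    (PySem.List.pyRange 0 maxLength 1).foldl (fun acc i =>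
      (PySem.List.pyRange 0 5 1).foldl (fun acc j =>
        match (PySem.List.pyGet? strings j).bind (fun s => PySem.Str.pyGet? s i) with
        | some c => acc ++ [c]        -- new_string += strings[j][i]
        | none => acc) acc) []        -- except: pass
  String.ofList newString

-- ===== PORT B =====
-- termination fact for the while loop below (cited by its decreasing_by)
theorem pvTailsSumLt (rows : List (List Char))
    (h : rows.any (fun r => !r.isEmpty) = true) :
    ((rows.map List.tail).map List.length).sum < (rows.map List.length).sum := by
  induction rows with
  | nil => simp at h
  | cons r rs ih =>
    simp only [List.any_cons, Bool.or_eq_true] at h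
    have hle : ((rs.map List.tail).map List.length).sum ≤ (rs.map List.length).sum := by
      clear h ih
      induction rs with
      | nil => simp
      | cons x xs ihx =>
        simp only [List.map_cons, List.sum_cons, List.length_tail]
        omega
    simp only [List.map_cons, List.sum_cons, List.length_tail]
    rcases h with h | h
    · cases r with
      | nil => simp at h
      | cons c cs => simp only [List.length_cons]; omega
    · have := ih h; omega

-- the 'while any(rows):' loop of Source B
def altLoop (rows : List (List Char)) (parts : List (List Char)) : List (List Char) :=
  if h : rows.any (fun r => !r.isEmpty) = true then
    altLoop (rows.map List.tail) (parts ++ [rows.filterMap List.head?])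
  else parts
termination_by (rows.map List.length).sum
decreasing_by simpa using pvTailsSumLt rows h

def read_vertically_alt (strings : List String) : String :=
  let rows := (PySem.List.slice strings none (some 5)).map String.toList   -- strings[:5]
  String.ofList (altLoop rows []).flatten                                  -- ''.join(parts)

-- ===== PRECONDITION & SPEC =====
def Spec_read_vertically (strings : List String) (out : String) : Prop := out = read_vertically_alt strings
instance (strings : List String) (out : String) : Decidable (Spec_read_vertically strings out) := by unfold Spec_read_vertically; infer_instance

-- ===== CLAIM (what is proved, stated in full; the proofs are below) =====
def Claim_equal_read_vertically : Prop := ∀ (strings : List String), Dom_read_vertically strings → Spec_read_vertically strings (read_vertically strings)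

-- ===== LEMMAS AND PROOFS =====

-- column i of the rows, top to bottom
def pvCol (rows : List (List Char)) (i : Nat) : List Char :=
  rows.filterMap (fun r => r[i]?)

-- maximal row length, as A's fold computes it (generalized accumulator)
def pvMaxFrom (rows : List (List Char)) (a : Nat) : Nat :=
  rows.foldl (fun m r => max m r.length) a

theorem pvMaxFrom_le (rows : List (List Char)) (a : Nat) : a ≤ pvMaxFrom rows a := by
  induction rows generalizing a with
  | nil => simp [pvMaxFrom]
  | cons r rs ih =>
    have := ih (max a r.length)
    simp only [pvMaxFrom, List.foldl_cons] at *
    omega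

theorem pvMaxFrom_mem_le (rows : List (List Char)) (a : Nat) (r : List Char)
    (hr : r ∈ rows) : r.length ≤ pvMaxFrom rows a := by
  induction rows generalizing a with
  | nil => simp at hr
  | cons x xs ih =>
    simp only [pvMaxFrom, List.foldl_cons]
    rcases List.mem_cons.mp hr with rfl | hr
    · have := pvMaxFrom_le xs (max a r.length)
      simp only [pvMaxFrom] at this
      omega
    · exact ih (max a x.length) hr

theorem pvMaxFrom_tail (rows : List (List Char)) (a : Nat) :
    pvMaxFrom (rows.map List.tail) (a - 1) = pvMaxFrom rows a - 1 := by
  induction rows generalizing a with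
  | nil => simp [pvMaxFrom]
  | cons r rs ih =>
    simp only [pvMaxFrom, List.map_cons, List.foldl_cons, List.length_tail] at *
    rw [show max (a - 1) (r.length - 1) = max a r.length - 1 by omega]
    exact ih (max a r.length)

theorem pvMaxFrom_zero_iff (rows : List (List Char)) :
    pvMaxFrom rows 0 = 0 ↔ ∀ r ∈ rows, r = [] := by
  constructor
  · intro h r hr
    have := pvMaxFrom_mem_le rows 0 r hr
    exact List.length_eq_zero_iff.mp (by omega)
  · intro h
    induction rows with
    | nil => simp [pvMaxFrom]
    | cons r rs ih =>
      have hr : r = [] := h r (by simp)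
      simp only [pvMaxFrom, List.foldl_cons, hr, List.length_nil, Nat.max_zero]
      exact ih (fun x hx => h x (by simp [hx]))

theorem pvMaxFrom_take_le (rows : List (List Char)) (n : Nat) (a : Nat) :
    pvMaxFrom (rows.take n) a ≤ pvMaxFrom rows a := by
  induction rows generalizing n a with
  | nil => simp
  | cons r rs ih =>
    cases n with
    | zero => simpa [pvMaxFrom] using pvMaxFrom_le (r :: rs) a
    | succ n =>
      simp only [List.take_succ_cons, pvMaxFrom, List.foldl_cons]
      exact ih n (max a r.length)

theorem pvCol_succ (rows : List (List Char)) (i : Nat) :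
    pvCol rows (i + 1) = pvCol (rows.map List.tail) i := by
  induction rows with
  | nil => simp [pvCol]
  | cons r rs ih =>
    simp only [pvCol, List.map_cons, List.filterMap_cons, ← List.getElem?_tail] at *
    cases r.tail[i]? <;> simp only [ih]

theorem pvCol_zero (rows : List (List Char)) :
    pvCol rows 0 = rows.filterMap List.head? := by
  simp [pvCol, List.head?_eq_getElem?]

theorem pvCol_eq_nil (rows : List (List Char)) (i : Nat) (h : pvMaxFrom rows 0 ≤ i) :
    pvCol rows i = [] := by
  rw [pvCol, List.filterMap_eq_nil_iff]
  intro r hr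
  have := pvMaxFrom_mem_le rows 0 r hr
  simp [List.getElem?_eq_none (by omega : r.length ≤ i)]

theorem altLoop_flatten (n : Nat) : ∀ (rows parts : List (List Char)),
    pvMaxFrom rows 0 = n →
    (altLoop rows parts).flatten
      = parts.flatten ++ (List.range n).flatMap (pvCol rows) := by
  induction n with
  | zero =>
    intro rows parts h
    have hall := (pvMaxFrom_zero_iff rows).mp h
    unfold altLoop
    have hany : ¬ rows.any (fun r => !r.isEmpty) = true := by
      simp only [List.any_eq_true, not_exists]
      intro r
      rintro ⟨hr, hb⟩
      rw [hall r hr] at hb; simp at hb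
    simp [hany]
  | succ n ih =>
    intro rows parts h
    have hany : rows.any (fun r => !r.isEmpty) = true := by
      by_contra hc
      simp only [List.any_eq_true, not_exists] at hc
      have : ∀ r ∈ rows, r = [] := by
        intro r hr
        have := hc r
        cases r with
        | nil => rfl
        | cons c cs => exact absurd ⟨hr, by simp⟩ this
      rw [(pvMaxFrom_zero_iff rows).mpr this] at h
      omega
    unfold altLoop
    simp only [hany, dite_true]
    have htail : pvMaxFrom (rows.map List.tail) 0 = n := by
      have := pvMaxFrom_tail rows 0
      simp only [Nat.zero_sub] at this
      omega
    rw [ih (rows.map List.tail) (parts ++ [rows.filterMap List.head?]) htail]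
    rw [List.range_succ_eq_map]
    simp only [List.flatMap_cons, List.flatMap_map, List.flatten_append,
      List.flatten_cons, List.flatten_nil, List.append_nil, List.append_assoc]
    congr 1
    rw [pvCol_zero]
    congr 1
    exact (List.flatMap_congr (fun i _ => (pvCol_succ rows i).symm)).symm ▸
      (List.flatMap_congr (fun i _ => (pvCol_succ rows i))).symm

-- A's max-length fold equals the Nat fold, cast to Int
theorem pvFoldA_eq (strings : List String) (a : Nat) :
    strings.foldl (fun m s => if PySem.Str.len s > m then PySem.Str.len s else m) (a : Int)
      = (pvMaxFrom (strings.map String.toList) a : Nat) := by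
  induction strings generalizing a with
  | nil => simp [pvMaxFrom]
  | cons s ss ih =>
    simp only [List.foldl_cons, pvMaxFrom, List.map_cons]
    have hlen : PySem.Str.len s = (s.toList.length : Int) := by simp [pysem]
    rw [hlen,
      show (if (s.toList.length : Int) > (a : Int) then (s.toList.length : Int) else (a : Int))
          = ((max a s.toList.length : Nat) : Int) by split_ifs <;> push_cast <;> omega]
    exact ih (max a s.toList.length)

-- the inner 'for j in range(5)' loop collects column k of strings[:5]
theorem pvInner_eq (strings : List String) (k : Nat) (acc : List Char) :
    (PySem.List.pyRange 0 5 1).foldl (fun acc j =>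
        match (PySem.List.pyGet? strings j).bind (fun s => PySem.Str.pyGet? s (k : Int)) with
        | some c => acc ++ [c]
        | none => acc) acc
      = acc ++ pvCol ((strings.take 5).map String.toList) k := by
  have h5 : PySem.List.pyRange 0 5 1 = [0, 1, 2, 3, 4] := by decide
  rw [h5]
  match strings with
  | [] =>
    simp [List.foldl, PySem.List.pyGet?, PySem.List.pyIdx?, pvCol]
  | [a] =>
    have p0 := PySem.List.pyGet?_natCast [a] 0
    have p1 := PySem.List.pyGet?_natCast [a] 1
    have p2 := PySem.List.pyGet?_natCast [a] 2
    have p3 := PySem.List.pyGet?_natCast [a] 3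
    have p4 := PySem.List.pyGet?_natCast [a] 4
    norm_num at p0 p1 p2 p3 p4
    simp only [List.foldl, p0, p1, p2, p3, p4, Option.bind_none,
      PySem.Str.pyGet?_natCast, List.take, List.map_cons, List.map_nil, pvCol,
      List.filterMap_cons, List.filterMap_nil]
    cases h1 : a.toList[k]? <;> simp [h1]
  | [a, b] =>
    have p0 := PySem.List.pyGet?_natCast [a, b] 0
    have p1 := PySem.List.pyGet?_natCast [a, b] 1
    have p2 := PySem.List.pyGet?_natCast [a, b] 2
    have p3 := PySem.List.pyGet?_natCast [a, b] 3
    have p4 := PySem.List.pyGet?_natCast [a, b] 4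
    norm_num at p0 p1 p2 p3 p4
    simp only [List.foldl, p0, p1, p2, p3, p4, Option.bind_none,
      PySem.Str.pyGet?_natCast, List.take, List.map_cons, List.map_nil, pvCol,
      List.filterMap_cons, List.filterMap_nil]
    cases h1 : a.toList[k]? <;> cases h2 : b.toList[k]? <;> simp [h1, h2]
  | [a, b, c] =>
    have p0 := PySem.List.pyGet?_natCast [a, b, c] 0
    have p1 := PySem.List.pyGet?_natCast [a, b, c] 1
    have p2 := PySem.List.pyGet?_natCast [a, b, c] 2
    have p3 := PySem.List.pyGet?_natCast [a, b, c] 3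
    have p4 := PySem.List.pyGet?_natCast [a, b, c] 4
    norm_num at p0 p1 p2 p3 p4
    simp only [List.foldl, p0, p1, p2, p3, p4, Option.bind_none,
      PySem.Str.pyGet?_natCast, List.take, List.map_cons, List.map_nil, pvCol,
      List.filterMap_cons, List.filterMap_nil]
    cases h1 : a.toList[k]? <;> cases h2 : b.toList[k]? <;> cases h3 : c.toList[k]? <;>
      simp [h1, h2, h3]
  | [a, b, c, d] =>
    have p0 := PySem.List.pyGet?_natCast [a, b, c, d] 0
    have p1 := PySem.List.pyGet?_natCast [a, b, c, d] 1
    have p2 := PySem.List.pyGet?_natCast [a, b, c, d] 2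
    have p3 := PySem.List.pyGet?_natCast [a, b, c, d] 3
    have p4 := PySem.List.pyGet?_natCast [a, b, c, d] 4
    norm_num at p0 p1 p2 p3 p4
    simp only [List.foldl, p0, p1, p2, p3, p4, Option.bind_none,
      PySem.Str.pyGet?_natCast, List.take, List.map_cons, List.map_nil, pvCol,
      List.filterMap_cons, List.filterMap_nil]
    cases h1 : a.toList[k]? <;> cases h2 : b.toList[k]? <;> cases h3 : c.toList[k]? <;>
      cases h4 : d.toList[k]? <;> simp [h1, h2, h3, h4]
  | a :: b :: c :: d :: e :: rest =>
    have p0 := PySem.List.pyGet?_natCast (a :: b :: c :: d :: e :: rest) 0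
    have p1 := PySem.List.pyGet?_natCast (a :: b :: c :: d :: e :: rest) 1
    have p2 := PySem.List.pyGet?_natCast (a :: b :: c :: d :: e :: rest) 2
    have p3 := PySem.List.pyGet?_natCast (a :: b :: c :: d :: e :: rest) 3
    have p4 := PySem.List.pyGet?_natCast (a :: b :: c :: d :: e :: rest) 4
    norm_num at p0 p1 p2 p3 p4
    simp only [List.foldl, p0, p1, p2, p3, p4,
      PySem.Str.pyGet?_natCast, List.take, List.map_cons, List.map_nil, pvCol,
      List.filterMap_cons, List.filterMap_nil]
    cases h1 : a.toList[k]? <;> cases h2 : b.toList[k]? <;> cases h3 : c.toList[k]? <;>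
      cases h4 : d.toList[k]? <;> cases h5 : e.toList[k]? <;> simp [h1, h2, h3, h4, h5]

theorem pvFlatMap_range_shrink (f : Nat → List Char) (n m : Nat) (hnm : n ≤ m)
    (hf : ∀ i, n ≤ i → f i = []) :
    (List.range m).flatMap f = (List.range n).flatMap f := by
  induction m, hnm using Nat.le_induction with
  | base => rfl
  | succ m hm ih =>
    rw [List.range_succ, List.flatMap_append]
    simp [hf m hm, ih]

-- ===== VERDICT (by name: the statement is the Claim_ definition above) =====
theorem read_vertically_spec : Claim_equal_read_vertically := by
  intro strings _
  unfold Spec_read_vertically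
  simp only [read_vertically, read_vertically_alt]
  rw [PySem.List.slice_to strings (show (0:Int) ≤ 5 by norm_num),
    show ((5:Int)).toNat = 5 from rfl]
  set rows := (strings.take 5).map String.toList with hrows
  have hM : strings.foldl (fun m s => if PySem.Str.len s > m then PySem.Str.len s else m) 0
      = ((pvMaxFrom (strings.map String.toList) 0 : Nat) : Int) := by
    simpa using pvFoldA_eq strings 0
  set MN := pvMaxFrom (strings.map String.toList) 0 with hMN
  rw [hM]
  have houter :
      (PySem.List.pyRange 0 ((MN : Nat) : Int) 1).foldl (fun acc i =>
        (PySem.List.pyRange 0 5 1).foldl (fun acc j =>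
          match (PySem.List.pyGet? strings j).bind (fun s => PySem.Str.pyGet? s i) with
          | some c => acc ++ [c]
          | none => acc) acc) ([] : List Char)
        = (List.range MN).flatMap (pvCol rows) := by
    rw [PySem.List.pyRange_one 0 ((MN : Nat) : Int)]
    simp only [Int.sub_zero, Int.toNat_natCast]
    rw [List.foldl_map]
    refine Eq.trans (PySem.List.foldl_congr_mem (List.range MN) _
      (fun (acc : List Char) (k : Nat) => acc ++ pvCol rows k) [] ?_) ?_
    · intro acc k _
      simp only [Int.zero_add]
      exact pvInner_eq strings k acc
    · rw [PySem.List.foldl_append_eq_flatMap (pvCol rows) (List.range MN) []]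
      simp
  rw [houter]
  have hB := altLoop_flatten (pvMaxFrom rows 0) rows [] rfl
  rw [hB]
  simp only [List.flatten_nil, List.nil_append]
  congr 1
  apply pvFlatMap_range_shrink
  · rw [hrows, hMN, List.map_take]
    exact pvMaxFrom_take_le (strings.map String.toList) 5 0
  · intro i hi
    exact pvCol_eq_nil rows i hi
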